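-- pv_equiv track=rewrite | github.com/abrarShariar/Algorithm-problem-solving | algoexpert/coding-problems/reverse_words/index.py | reverseUtility
-- ===== SOURCE A (Python) =====
-- def reverseUtility(input_entity):
-- 	left_pointer = 0
-- 	right_pointer = len(input_entity) - 1
-- 	ll_word = list(input_entity)
--
-- 	while left_pointer < right_pointer:
-- 		ll_word[left_pointer], ll_word[right_pointer] = ll_word[right_pointer], ll_word[left_pointer]
-- 		left_pointer += 1
-- 		right_pointer -= 1
--
-- 	return ll_word
-- ===== SOURCE B (Python) =====
-- def reverseUtility(input_entity):
--     lst = list(input_entity)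
--     out = []
--     for i in range(len(lst) - 1, -1, -1):
--         out.append(lst[i])
--     return out
-- ===== Notes on version B (the rewrite author's own statement) =====
-- stated objective: alternative
-- what changed: Replaces the half-length in-place two-pointer swap with a single accumulation pass that appends elements from the back into a fresh output list.
import Mathlib
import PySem

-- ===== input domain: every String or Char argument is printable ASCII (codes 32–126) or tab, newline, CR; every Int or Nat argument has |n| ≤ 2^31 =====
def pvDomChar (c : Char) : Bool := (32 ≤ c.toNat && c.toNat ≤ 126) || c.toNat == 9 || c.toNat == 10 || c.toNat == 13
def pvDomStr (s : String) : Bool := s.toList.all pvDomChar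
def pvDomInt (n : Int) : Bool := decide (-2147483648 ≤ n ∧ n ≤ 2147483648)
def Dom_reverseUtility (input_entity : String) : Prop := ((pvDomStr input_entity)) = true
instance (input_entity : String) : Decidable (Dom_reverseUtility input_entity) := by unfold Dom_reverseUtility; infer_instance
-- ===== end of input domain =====

-- B replaces A's half-length in-place two-pointer swap with a single accumulation pass
-- appending elements from the back into a fresh output list (alternative decomposition, same cost).

-- ===== PORT A =====
-- the while loop: swap ends, move pointers inward (indices are always in range when l < r ≤ len-1,
-- so Python's ll_word[i] never raises; getD's default is never read)
def pvSwapA (xs : List String) (l r : Nat) : List String :=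
  if l < r then
    pvSwapA ((xs.set l (xs.getD r "")).set r (xs.getD l "")) (l + 1) (r - 1)
  else xs
termination_by r - l

-- list(input_entity) = the one-character strings of input_entity; len("")-1 = -1 in Python,
-- and 0 < -1 is false just as 0 < 0 is here, so the Nat truncation is faithful
def reverseUtility (input_entity : String) : List String :=
  pvSwapA (input_entity.toList.map (fun c => String.singleton c)) 0
    (input_entity.toList.length - 1)

-- ===== PORT B =====
-- out = []; for i in range(len(lst)-1, -1, -1): out.append(lst[i])
def pvBuildB (lst : List String) : List String :=
  (PySem.List.pyRange ((lst.length : Int) - 1) (-1) (-1)).foldl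
    (fun out i => out ++ [PySem.List.pyGetD lst i ""]) []

def reverseUtility_alt (input_entity : String) : List String :=
  pvBuildB (input_entity.toList.map (fun c => String.singleton c))

-- ===== PRECONDITION & SPEC =====
def Spec_reverseUtility (input_entity : String) (out : List String) : Prop := out = reverseUtility_alt input_entity
instance (input_entity : String) (out : List String) : Decidable (Spec_reverseUtility input_entity out) := by unfold Spec_reverseUtility; infer_instance

-- ===== CLAIM (what is proved, stated in full; the proofs are below) =====
def Claim_equal_reverseUtility : Prop := ∀ (input_entity : String), Dom_reverseUtility input_entity → Spec_reverseUtility input_entity (reverseUtility input_entity)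

-- ===== LEMMAS AND PROOFS =====

-- elementwise characterisation of the two-pointer swap loop: it reverses the segment [l, r]
theorem pvSwapA_getElem? (xs : List String) (l r : Nat) (hr : r < xs.length) (i : Nat) :
    (pvSwapA xs l r)[i]? = if l ≤ i ∧ i ≤ r then xs[l + r - i]? else xs[i]? := by
  fun_induction pvSwapA xs l r with
  | case1 xs l r h ih =>
    have hl : l < xs.length := lt_of_lt_of_le h (le_of_lt hr)
    have hr' : r - 1 < ((xs.set l (xs.getD r "")).set r (xs.getD l "")).length := by
      simp; omega
    rw [ih hr']
    by_cases h1 : l + 1 ≤ i ∧ i ≤ r - 1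
    · rw [if_pos h1, if_pos (show l ≤ i ∧ i ≤ r by omega),
        (show l + 1 + (r - 1) - i = l + r - i by omega)]
      simp only [List.getElem?_set, List.length_set]
      rw [if_neg (by omega : ¬ r = l + r - i), if_neg (by omega : ¬ l = l + r - i)]
    · rw [if_neg h1]
      simp only [List.getElem?_set, List.length_set]
      by_cases h2 : i = r
      · rw [if_pos (show l ≤ i ∧ i ≤ r by omega), if_pos (by omega : r = i), if_pos hr,
          List.getD_eq_getElem xs "" hl, (show l + r - i = l by omega),
          List.getElem?_eq_getElem hl]
      · by_cases h3 : i = l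
        · rw [if_pos (show l ≤ i ∧ i ≤ r by omega), if_neg (by omega : ¬ r = i),
            if_pos (by omega : l = i), if_pos hl, List.getD_eq_getElem xs "" hr,
            (show l + r - i = r by omega), List.getElem?_eq_getElem hr]
        · rw [if_neg (show ¬ (l ≤ i ∧ i ≤ r) by omega), if_neg (by omega : ¬ r = i),
            if_neg (by omega : ¬ l = i)]
  | case2 xs l r h =>
    by_cases hc : l ≤ i ∧ i ≤ r
    · rw [if_pos hc, (show l + r - i = i by omega)]
    · rw [if_neg hc]

theorem pvSwapA_eq_reverse (xs : List String) : pvSwapA xs 0 (xs.length - 1) = xs.reverse := by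
  rcases Nat.eq_zero_or_pos xs.length with h0 | h0
  · have : xs = [] := List.eq_nil_of_length_eq_zero h0
    simp [this, pvSwapA]
  · apply List.ext_getElem?
    intro i
    rw [pvSwapA_getElem? xs 0 (xs.length - 1) (by omega) i]
    by_cases hi : i < xs.length
    · rw [if_pos (show 0 ≤ i ∧ i ≤ xs.length - 1 by omega), Nat.zero_add,
        List.getElem?_eq_getElem (by omega), List.getElem?_eq_getElem (by simpa using hi)]
      rw [List.getElem_reverse]
    · rw [if_neg (show ¬ (0 ≤ i ∧ i ≤ xs.length - 1) by omega),
        List.getElem?_eq_none (by omega), List.getElem?_eq_none (by simpa using hi)]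

theorem pvBuildB_eq_reverse (lst : List String) : pvBuildB lst = lst.reverse := by
  unfold pvBuildB
  rw [PySem.List.pyRange_neg_one,
    (show ((lst.length : Int) - 1 - -1).toNat = lst.length by omega),
    PySem.List.foldl_append_singleton_eq_map, List.map_map]
  apply List.ext_getElem?
  intro i
  by_cases hi : i < lst.length
  · rw [List.getElem?_eq_getElem (by simpa using hi), List.getElem?_eq_getElem (by simpa using hi)]
    simp only [List.nil_append, List.getElem_map, List.getElem_range, Function.comp_apply,
      List.getElem_reverse]
    rw [(show (lst.length : Int) - 1 - (i : Int) = ((lst.length - 1 - i : Nat) : Int) by omega),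
      PySem.List.pyGetD_natCast]
    exact congrArg some (List.getD_eq_getElem lst "" (by omega))
  · rw [List.getElem?_eq_none (by simpa using hi), List.getElem?_eq_none (by simpa using hi)]

-- ===== VERDICT (by name: the statement is the Claim_ definition above) =====
theorem reverseUtility_spec : Claim_equal_reverseUtility := by
  intro s _
  unfold Spec_reverseUtility reverseUtility reverseUtility_alt
  rw [pvBuildB_eq_reverse,
    (show s.toList.length - 1 = (s.toList.map (fun c => String.singleton c)).length - 1 by
      rw [List.length_map]),
    pvSwapA_eq_reverse]
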